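-- pv_equiv track=rewrite | github.com/daegu-algo-party-210824/younghang_algo | 기출/18.괄호변환.py | solution
-- ===== SOURCE A (Python) =====
-- def solution(p):
--     # 균형잡힌 괄호 판단 방법.
--     # 올바른 괄호 판단 방법.
--     def make_uv(p) :
--         r = 0
--         l = 0
--         for i in range(len(p)) :
--             if p[i] == '(':
--                 l +=1
--             else :
--                 r +=1
--             if l == r :
--                 break
--         return p[:i+1], p[i+1:]
--     #균형 잡힌 괄호 문자열임을 판단하는 것.
--     def check(s) :
--         temp = 0
--         for i in range(len(s)):
--             if s[i] == '(' :
--                 temp+=1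
--             else :
--                 temp -=1
--             if temp < 0 :
--                 return False
--
--         return temp == 0
--
--
--     if  not p : #1번
--         return ''
--     else :
--         #2번
--         u,v = make_uv(p)
--         #3번
--         if check(u) == True :
--             return u + solution(v)
--         #4번
--         else :
--             temp = '('
--             temp += solution(v)
--             temp += ')'
--
--             u = u [1:-1]      #잘 짤랐네
--             for i in range(len(u)):
--                 if u[i] == '(' :
--                     temp += ')'
--                 else :
--                     temp += '('
--             return temp
-- ===== SOURCE B (Python) =====
-- def solution(p):
--     # B: iteratively split p into top-level chunks (shortest balanced prefixes),
--     # then fold the chunk list right-to-left into the answer (no recursion).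
--     def make_uv(s):
--         r = 0
--         l = 0
--         for i in range(len(s)):
--             if s[i] == '(':
--                 l += 1
--             else:
--                 r += 1
--             if l == r:
--                 break
--         return s[:i + 1], s[i + 1:]
--
--     def check(s):
--         temp = 0
--         for c in s:
--             temp += 1 if c == '(' else -1
--             if temp < 0:
--                 return False
--         return temp == 0
--
--     chunks = []
--     rest = p
--     while rest:
--         u, rest = make_uv(rest)
--         chunks.append(u)
--
--     acc = ''
--     for chunk in reversed(chunks):
--         if check(chunk):
--             acc = chunk + acc
--         else:
--             flipped = ''.join(')' if c == '(' else '(' for c in chunk[1:-1])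
--             acc = '(' + acc + ')' + flipped
--     return acc
-- ===== Notes on version B (the rewrite author's own statement) =====
-- stated objective: alternative
-- what changed: Replaces A's recursion over the remaining suffix with an iterative split of p into top-level balanced chunks followed by a right-to-left fold of the chunk list into the answer string; per-chunk check/flip logic is unchanged.
import Mathlib
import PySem

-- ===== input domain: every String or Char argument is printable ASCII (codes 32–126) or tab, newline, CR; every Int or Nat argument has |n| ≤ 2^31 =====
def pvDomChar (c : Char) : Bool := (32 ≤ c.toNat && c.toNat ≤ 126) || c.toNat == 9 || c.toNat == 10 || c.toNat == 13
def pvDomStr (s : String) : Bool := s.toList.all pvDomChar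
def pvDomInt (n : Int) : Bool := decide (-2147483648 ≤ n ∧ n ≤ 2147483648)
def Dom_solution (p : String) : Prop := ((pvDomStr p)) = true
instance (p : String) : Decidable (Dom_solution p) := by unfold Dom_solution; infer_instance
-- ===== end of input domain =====

-- B replaces A's recursion over the suffix by an explicit chunk split plus a right fold; same result, similar cost.

-- ===== PORT A =====
-- make_uv: scan for the shortest prefix with equal counts; returns (p[:i+1], p[i+1:]).
def makeUVGo : List Char → Int → Int → List Char × List Char
  | [], _, _ => ([], [])
  | c :: cs, l, r =>
    let l' := if c = '(' then l + 1 else l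
    let r' := if c = '(' then r else r + 1
    if l' = r' then ([c], cs)
    else
      let uv := makeUVGo cs l' r'
      (c :: uv.1, uv.2)

-- check: running counter, early False when negative, True iff ends at 0.
def checkGo : List Char → Int → Bool
  | [], t => t == 0
  | c :: cs, t =>
    let t' := if c = '(' then t + 1 else t - 1
    if t' < 0 then false else checkGo cs t'

theorem makeUVGo_snd_lt : ∀ (p : List Char) (l r : Int), p ≠ [] →
    (makeUVGo p l r).2.length < p.length := by
  intro p
  induction p with
  | nil => intro l r h; exact absurd rfl h
  | cons c cs ih =>
    intro l r _
    simp only [makeUVGo]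
    generalize (if c = '(' then l + 1 else l) = l'
    generalize (if c = '(' then r else r + 1) = r'
    split
    · simp
    · rcases cs with _ | ⟨d, ds⟩
      · simp [makeUVGo]
      · have := ih l' r' (by simp)
        simp only [List.length_cons] at *
        omega

-- A's core recursion; u[1:-1] is (u.drop 1).dropLast (exact for every list, incl. len ≤ 1);
-- the flip loop 'temp += …' is the foldl appending one char per step.
def solutionCore (p : List Char) : List Char :=
  match hp : p with
  | [] => []
  | _ :: _ =>
    let uv := makeUVGo p 0 0
    if checkGo uv.1 0 = true then uv.1 ++ solutionCore uv.2
    else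
      let temp := '(' :: solutionCore uv.2 ++ [')']
      ((uv.1.drop 1).dropLast).foldl
        (fun t c => t ++ [if c = '(' then ')' else '(']) temp
termination_by p.length
decreasing_by
  all_goals
    exact hp ▸ makeUVGo_snd_lt p 0 0 (by rw [hp]; simp)

def solution (p : String) : String := String.ofList (solutionCore p.toList)

-- ===== PORT B =====
-- split p into top-level chunks by repeated make_uv (B's while loop)
def chunksGo (p : List Char) : List (List Char) :=
  match hp : p with
  | [] => []
  | _ :: _ =>
    let uv := makeUVGo p 0 0
    uv.1 :: chunksGo uv.2
termination_by p.length
decreasing_by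
  exact hp ▸ makeUVGo_snd_lt p 0 0 (by rw [hp]; simp)

-- one step of B's reversed-order accumulator loop (flip via join of a map)
def stepB (chunk acc : List Char) : List Char :=
  if checkGo chunk 0 = true then chunk ++ acc
  else '(' :: acc ++ ')' :: ((chunk.drop 1).dropLast).map (fun c => if c = '(' then ')' else '(')

def solution_alt (p : String) : String :=
  String.ofList ((chunksGo p.toList).foldr stepB [])

-- ===== PRECONDITION & SPEC =====
def Spec_solution (p : String) (out : String) : Prop := out = solution_alt p
instance (p : String) (out : String) : Decidable (Spec_solution p out) := by unfold Spec_solution; infer_instance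

-- ===== CLAIM (what is proved, stated in full; the proofs are below) =====
def Claim_equal_solution : Prop := ∀ (p : String), Dom_solution p → Spec_solution p (solution p)

-- ===== LEMMAS AND PROOFS =====
theorem foldl_append_map (u : List Char) (t : List Char) :
    u.foldl (fun t c => t ++ [if c = '(' then ')' else '(']) t
      = t ++ u.map (fun c => if c = '(' then ')' else '(') := by
  induction u generalizing t with
  | nil => simp
  | cons c cs ih => simp [List.foldl, ih, List.append_assoc]

theorem core_eq_fold_aux : ∀ (n : Nat) (p : List Char), p.length ≤ n →
    solutionCore p = (chunksGo p).foldr stepB [] := by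
  intro n
  induction n with
  | zero =>
    intro p hp
    have hnil : p = [] := by cases p <;> simp_all
    subst hnil
    simp [solutionCore, chunksGo]
  | succ n ih =>
    intro p hp
    cases p with
    | nil => simp [solutionCore, chunksGo]
    | cons c cs =>
      rw [solutionCore, chunksGo]
      have hv := makeUVGo_snd_lt (c :: cs) 0 0 (by simp)
      have ihv := ih (makeUVGo (c :: cs) 0 0).2
        (by simp only [List.length_cons] at hp hv ⊢; omega)
      simp only [List.foldr_cons, stepB]
      by_cases hc : checkGo (makeUVGo (c :: cs) 0 0).1 0 = true
      · simp [hc, ihv]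
      · simp only [if_neg hc, foldl_append_map, ihv]
        simp

theorem core_eq_fold (p : List Char) : solutionCore p = (chunksGo p).foldr stepB [] :=
  core_eq_fold_aux p.length p le_rfl

-- ===== VERDICT (by name: the statement is the Claim_ definition above) =====
theorem solution_spec : Claim_equal_solution := by
  intro p _
  unfold Spec_solution solution solution_alt
  rw [core_eq_fold]
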